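-- pv_equiv track=rewrite | github.com/sabyasachirakshit/My-Codes | My_Django_Practice/playwithnumbers/mynumbers/logics.py | check_vampire
-- ===== SOURCE A (Python) =====
-- import math,itertools
--
-- def check_vampire(minx,maxx):
--     vampire_list=[]
--     while(minx <= maxx):
--         temp = minx
--         c = 0
--         while(temp > 0):
--             c += 1
--             temp //= 10
--         if c % 2 == 0:
--             num_lst = []
--             temp = minx
--             while temp > 0:
--                 digit = temp % 10
--                 num_lst.append(digit)
--                 temp //= 10
--             num_lst = num_lst[::-1]
--             lst1 = []
--             lst2 = []
--             mid = len(num_lst)//2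
--             for i in range(0, mid):
--                 lst1.append(str(num_lst[i]))
--             for i in range(mid, len(num_lst)):
--                 lst2.append(str(num_lst[i]))
--             for i, j in enumerate(lst1):
--                 lst1[i] = int(lst1[i])
--             for i, j in enumerate(lst2):
--                 lst2[i] = int(lst2[i])
--             s1 = list(itertools.permutations(lst1))
--             x1 = []
--             for i in s1:
--                 x1.append(list(i))
--             new1 = []
--             for i in x1:
--                 for j in i:
--                     new1.append(j)
--             for i, j in enumerate(new1):
--                 new1[i] = str(new1[i])
--             concat = ''
--             i = 1
--             perm1 = []
--             while i <= len(new1):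
--                 if i % len(lst1) != 0:
--                     concat += new1[i-1]
--                 else:
--                     concat += new1[i-1]
--                     perm1.append(concat)
--                     concat = ''
--                 i += 1
--             for i, j in enumerate(perm1):
--                 perm1[i] = int(perm1[i])
--             s2 = list(itertools.permutations(lst2))
--             x1 = []
--             for i in s2:
--                 x1.append(list(i))
--             new1 = []
--             for i in x1:
--                 for j in i:
--                     new1.append(j)
--             for i, j in enumerate(new1):
--                 new1[i] = str(new1[i])
--             concat = ''
--             i = 1
--             perm2 = []
--             while i <= len(new1):
--                 if i % len(lst2) != 0:
--                     concat += new1[i-1]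
--                 else:
--                     concat += new1[i-1]
--                     perm2.append(concat)
--                     concat = ''
--                 i += 1
--             for i, j in enumerate(perm2):
--                 perm2[i] = int(perm2[i])
--             mult = []
--             for i in perm1:
--                 for j in perm2:
--                     mult.append(i*j)
--             for i in mult:
--                 if i == minx:
--                     vampire_list.append(minx)
--                     break
--         minx += 1
--     return vampire_list
-- ===== SOURCE B (Python) =====
-- import itertools
--
-- def check_vampire(minx, maxx):
--     # Same result as A: for each even-digit-count n, n is listed iff some
--     # permutation of its first half-digits times some permutation of its
--     # second half-digits equals n.  Instead of A's full cross product of the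
--     # two permutation lists, build the set of second-half values once and,
--     # for each first-half permutation value v, test divisibility and set
--     # membership of n // v.
--     res = []
--     for n in range(minx, maxx + 1):
--         ds = []
--         t = n
--         while t > 0:
--             ds.append(t % 10)
--             t //= 10
--         ds = ds[::-1]
--         if ds and len(ds) % 2 == 0:
--             k = len(ds) // 2
--             targets = {_num(p) for p in itertools.permutations(ds[k:])}
--             if any(n % _num(p) == 0 and n // _num(p) in targets
--                    for p in itertools.permutations(ds[:k])):
--                 res.append(n)
--     return res
--
-- def _num(p):
--     return int(''.join(str(d) for d in p))
-- ===== Notes on version B (the rewrite author's own statement) =====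
-- stated objective: faster
-- what changed: A compares n against the full cross product of first-half and second-half digit-permutation values; B builds the set of second-half permutation values once per n and, for each first-half permutation value v, tests n % v == 0 and n // v in that set, removing the inner product scan.
import Mathlib
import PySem

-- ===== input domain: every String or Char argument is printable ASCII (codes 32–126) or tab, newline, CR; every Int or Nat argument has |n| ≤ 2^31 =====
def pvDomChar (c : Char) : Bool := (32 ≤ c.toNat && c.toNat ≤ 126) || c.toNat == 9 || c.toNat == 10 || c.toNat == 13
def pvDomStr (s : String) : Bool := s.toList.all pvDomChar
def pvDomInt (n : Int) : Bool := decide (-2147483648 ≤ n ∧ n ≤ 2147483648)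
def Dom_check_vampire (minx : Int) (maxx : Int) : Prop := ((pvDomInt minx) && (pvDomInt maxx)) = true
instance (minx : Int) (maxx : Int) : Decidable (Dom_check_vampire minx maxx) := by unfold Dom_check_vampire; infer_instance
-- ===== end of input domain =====

-- B replaces A's cross product of half-digit permutation values by a set of
-- second-half values plus a divisibility test per first-half value (faster; the
-- timing run measures the speed-up on large ranges).


-- ===== PORT A =====

-- termination facts cited by the loop ports
theorem pvDivTenDec (t : Int) (h : t > 0) : (PySem.Int.floordiv t 10).toNat < t.toNat := by
  rw [PySem.Int.floordiv_eq_ediv_of_pos (by norm_num : (0:Int) < 10)]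
  omega

theorem pvIdxDec (L i : Int) (h : i ≤ L) : (L + 1 - (i + 1)).toNat < (L + 1 - i).toNat := by
  omega

-- `while temp > 0: c += 1; temp //= 10`  (digit count)
def pvCountLoop (temp : Int) (c : Int) : Int :=
  if h : temp > 0 then pvCountLoop (PySem.Int.floordiv temp 10) (c + 1) else c
termination_by temp.toNat
decreasing_by exact pvDivTenDec temp h

-- `while temp > 0: num_lst.append(temp % 10); temp //= 10`  (identical loop in A and B)
def pvDigitsLoop (temp : Int) (acc : List Int) : List Int :=
  if h : temp > 0 then
    pvDigitsLoop (PySem.Int.floordiv temp 10) (acc ++ [PySem.Int.mod temp 10])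
  else acc
termination_by temp.toNat
decreasing_by exact pvDivTenDec temp h

-- A's `while i <= len(new1): … concat += new1[i-1] … if i % len(lst) == 0: append`
def pvConcatLoop (new1 : List String) (den : Int) (i : Int) (concat : String)
    (perm : List String) : List String :=
  if h : i ≤ (new1.length : Int) then
    if PySem.Int.mod i den ≠ 0 then
      pvConcatLoop new1 den (i + 1) (concat ++ PySem.List.pyGetD new1 (i - 1) "") perm
    else
      pvConcatLoop new1 den (i + 1) "" (perm ++ [concat ++ PySem.List.pyGetD new1 (i - 1) ""])
  else perm
termination_by ((new1.length : Int) + 1 - i).toNat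
decreasing_by all_goals exact pvIdxDec _ _ h

-- A's duplicated permutation block (run once for lst1, once for lst2):
-- permutations → lists → flatten → str → regroup by concatenation → int
def pvPermInts (lst : List Int) : List Int :=
  let s1 := PySem.List.permutations lst lst.length
  let x1 := s1.map (fun i => i)
  let new1 := x1.flatMap (fun i => i)
  let new1s := new1.map PySem.Int.toStr
  let perm := pvConcatLoop new1s (lst.length : Int) 1 "" []
  perm.map (fun s => (PySem.Int.ofStr? s).getD 0)   -- int() never fails on these digit strings

-- A's per-number body (the code inside the outer while, deciding whether minx is appended)
def pvVampireA (n : Int) : Bool :=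
  let c := pvCountLoop n 0
  if PySem.Int.mod c 2 == 0 then
    let num_lst := (pvDigitsLoop n []).reverse                       -- num_lst[::-1]
    let mid := PySem.Int.floordiv (num_lst.length : Int) 2
    let lst1 := (PySem.List.pyRange 0 mid 1).foldl
      (fun acc i => acc ++ [PySem.Int.toStr (PySem.List.pyGetD num_lst i 0)]) []
    let lst2 := (PySem.List.pyRange mid (num_lst.length : Int) 1).foldl
      (fun acc i => acc ++ [PySem.Int.toStr (PySem.List.pyGetD num_lst i 0)]) []
    let lst1I := lst1.map (fun s => (PySem.Int.ofStr? s).getD 0)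
    let lst2I := lst2.map (fun s => (PySem.Int.ofStr? s).getD 0)
    let perm1 := pvPermInts lst1I
    let perm2 := pvPermInts lst2I
    let mult := perm1.flatMap (fun i => perm2.map (fun j => i * j))
    mult.any (fun i => i == n)                                       -- for i in mult: if i == minx: append; break
  else false

-- `while minx <= maxx: … minx += 1`
def pvLoopA (minx maxx : Int) (acc : List Int) : List Int :=
  if minx ≤ maxx then
    pvLoopA (minx + 1) maxx (acc ++ if pvVampireA minx then [minx] else [])
  else acc
termination_by (maxx + 1 - minx).toNat
decreasing_by exact pvIdxDec maxx minx (by omega)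

def check_vampire (minx : Int) (maxx : Int) : List Int := pvLoopA minx maxx []

-- ===== PORT B =====

-- B's `_num(p) = int(''.join(str(d) for d in p))`
def pvNumB (p : List Int) : Int :=
  (PySem.Int.ofStr? (PySem.Str.join "" (p.map PySem.Int.toStr))).getD 0

-- B's per-number body
def pvVampireB (n : Int) : Bool :=
  let ds := (pvDigitsLoop n []).reverse
  if !ds.isEmpty && ds.length % 2 == 0 then
    let k := ds.length / 2
    let targets : PySem.Set Int :=
      PySem.Set.ofList ((PySem.List.permutations (ds.drop k) (ds.drop k).length).map pvNumB)
    (PySem.List.permutations (ds.take k) (ds.take k).length).any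
      (fun p => PySem.Int.mod n (pvNumB p) == 0 &&
                targets.contains (PySem.Int.floordiv n (pvNumB p)))
  else false

def check_vampire_alt (minx : Int) (maxx : Int) : List Int :=
  (PySem.List.pyRange minx (maxx + 1) 1).foldl
    (fun acc n => if pvVampireB n then acc ++ [n] else acc) []

-- ===== PRECONDITION & SPEC =====
def Spec_check_vampire (minx : Int) (maxx : Int) (out : List Int) : Prop := out = check_vampire_alt minx maxx
instance (minx : Int) (maxx : Int) (out : List Int) : Decidable (Spec_check_vampire minx maxx out) := by unfold Spec_check_vampire; infer_instance

-- ===== CLAIM (what is proved, stated in full; the proofs are below) =====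
def Claim_equal_check_vampire : Prop := ∀ (minx : Int) (maxx : Int), Dom_check_vampire minx maxx → Spec_check_vampire minx maxx (check_vampire minx maxx)

-- ===== LEMMAS AND PROOFS =====

-- digitsLoop accumulator
theorem pvDigitsLoop_acc (t : Int) (acc acc' : List Int) :
    pvDigitsLoop t (acc ++ acc') = acc ++ pvDigitsLoop t acc' := by
  by_cases h : t > 0
  · conv_lhs => rw [pvDigitsLoop]
    conv_rhs => rw [pvDigitsLoop]
    rw [dif_pos h, dif_pos h, List.append_assoc,
      pvDigitsLoop_acc (PySem.Int.floordiv t 10) acc (acc' ++ [PySem.Int.mod t 10])]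
  · conv_lhs => rw [pvDigitsLoop]
    conv_rhs => rw [pvDigitsLoop]
    rw [dif_neg h, dif_neg h]
termination_by t.toNat
decreasing_by
  rw [PySem.Int.floordiv_eq_ediv_of_pos (by norm_num : (0:Int) < 10)]
  omega

theorem pvDigitsLoop_nonpos {t : Int} (h : ¬ t > 0) (acc : List Int) :
    pvDigitsLoop t acc = acc := by
  unfold pvDigitsLoop; simp [h]

theorem pvCountLoop_eq (t : Int) (c : Int) :
    pvCountLoop t c = c + ((pvDigitsLoop t []).length : Int) := by
  by_cases h : t > 0
  · conv_lhs => rw [pvCountLoop]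
    conv_rhs => rw [pvDigitsLoop]
    rw [dif_pos h, dif_pos h,
      pvCountLoop_eq (PySem.Int.floordiv t 10) (c + 1)]
    have := pvDigitsLoop_acc (PySem.Int.floordiv t 10) [PySem.Int.mod t 10] []
    simp at this ⊢
    rw [this]
    simp
    push_cast
    ring
  · conv_lhs => rw [pvCountLoop]
    conv_rhs => rw [pvDigitsLoop]
    rw [dif_neg h, dif_neg h]
    simp
termination_by t.toNat
decreasing_by
  rw [PySem.Int.floordiv_eq_ediv_of_pos (by norm_num : (0:Int) < 10)]
  omega

-- every digit produced is in [0, 10)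
theorem pvDigitsLoop_digits {t : Int} {acc : List Int}
    (hacc : ∀ d ∈ acc, 0 ≤ d ∧ d < 10) :
    ∀ d ∈ pvDigitsLoop t acc, 0 ≤ d ∧ d < 10 := by
  by_cases h : t > 0
  · rw [pvDigitsLoop, dif_pos h]
    refine pvDigitsLoop_digits ?_
    intro d hd
    rcases List.mem_append.mp hd with hd | hd
    · exact hacc d hd
    · rw [List.mem_singleton] at hd
      subst hd
      exact ⟨PySem.Int.mod_nonneg _ (by norm_num), PySem.Int.mod_lt _ (by norm_num)⟩
  · rw [pvDigitsLoop, dif_neg h]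
    exact hacc
termination_by t.toNat
decreasing_by
  rw [PySem.Int.floordiv_eq_ediv_of_pos (by norm_num : (0:Int) < 10)]
  omega

-- int(str(d)) = d for a single digit
theorem pvRoundTrip {d : Int} (h0 : 0 ≤ d) (h1 : d < 10) :
    (PySem.Int.ofStr? (PySem.Int.toStr d)).getD 0 = d := by
  interval_cases d <;> decide

-- the append-in-a-loop pattern is a map
theorem pvFoldlAppend {α β : Type} (l : List α) (f : α → β) (init : List β) :
    l.foldl (fun acc i => acc ++ [f i]) init = init ++ l.map f := by
  induction l generalizing init with
  | nil => simp
  | cons x xs ih => simp [List.foldl_cons, ih]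

-- indexing a prefix range is take
theorem pvRangeTake {α : Type} (xs : List α) (d : α) (k : Nat) (hk : k ≤ xs.length) :
    (PySem.List.pyRange 0 (k : Int) 1).map (fun j => PySem.List.pyGetD xs j d) = xs.take k := by
  induction k with
  | zero => simp [PySem.List.pyRange_one_eq_nil]
  | succ k ih =>
    have hk' : k ≤ xs.length := Nat.le_of_succ_le hk
    have hlt : k < xs.length := hk
    have : ((k + 1 : Nat) : Int) = (k : Int) + 1 := by push_cast; ring
    rw [this, PySem.List.pyRange_one_succ_right (by positivity), List.map_append,
      ih hk', List.take_succ]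
    simp [PySem.List.pyGetD_natCast, List.getD_eq_getElem?_getD, List.getElem?_eq_getElem hlt]

-- intercalating an empty separator is flatten
theorem pvIntercalateNil {α : Type} (l : List (List α)) :
    List.intercalate [] l = l.flatten := by
  unfold List.intercalate
  induction l with
  | nil => simp
  | cons x xs ih =>
    cases xs with
    | nil => simp
    | cons y ys =>
      simp only [List.intersperse, List.flatten_cons] at *
      simp at ih ⊢
      simp [ih]

-- ''.join = foldl (++) ""
theorem pvJoinEq (ss : List String) :
    PySem.Str.join "" ss = ss.foldl (· ++ ·) "" := by
  have key : ∀ (init : String), (ss.foldl (· ++ ·) init).toList = init.toList ++ (ss.map String.toList).flatten := by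
    induction ss with
    | nil => simp
    | cons x xs ih => intro init; simp [List.foldl_cons, ih, String.toList_append]
  apply String.toList_inj.mp
  rw [key]
  unfold PySem.Str.join PySem.Chars.join
  simp only [show "".toList = ([]:List Char) from rfl]
  rw [pvIntercalateNil]
  simp [String.toList_ofList]

-- list-consuming version of pvConcatLoop (proof helper)
def pvGroupLoop (den : Int) : List String → Int → String → List String → List String
  | [], _, _, perm => perm
  | s :: rest, i, concat, perm =>
    if PySem.Int.mod i den ≠ 0 then pvGroupLoop den rest (i + 1) (concat ++ s) perm
    else pvGroupLoop den rest (i + 1) "" (perm ++ [concat ++ s])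

theorem pvConcat_eq_group (new1 : List String) (den : Int) :
    ∀ (i : Int), 1 ≤ i → ∀ (concat : String) (perm : List String),
    pvConcatLoop new1 den i concat perm = pvGroupLoop den (new1.drop (i - 1).toNat) i concat perm := by
  intro i h1 concat perm
  by_cases h : i ≤ (new1.length : Int)
  · have hidx : (i - 1).toNat < new1.length := by omega
    have hdrop : new1.drop (i - 1).toNat = new1[(i - 1).toNat] :: new1.drop ((i - 1).toNat + 1) :=
      List.drop_eq_getElem_cons hidx
    have hget : PySem.List.pyGetD new1 (i - 1) "" = new1[(i - 1).toNat] :=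
      PySem.List.pyGetD_eq_getElem _ _ (by omega) (by exact_mod_cast (by omega : i - 1 < (new1.length : Int)))
    have hstep : ((i + 1) - 1).toNat = (i - 1).toNat + 1 := by omega
    rw [pvConcatLoop, dif_pos h, hdrop]
    simp only [pvGroupLoop]
    split_ifs with hmod
    · rw [pvConcat_eq_group new1 den (i + 1) (by omega), hget, hstep]
    · rw [pvConcat_eq_group new1 den (i + 1) (by omega), hget, hstep]
  · have hdrop : new1.drop (i - 1).toNat = [] := List.drop_eq_nil_of_le (by omega)
    rw [pvConcatLoop, dif_neg h, hdrop]
    rfl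
termination_by i => ((new1.length : Int) + 1 - i).toNat
decreasing_by all_goals omega

theorem pvGroupLoop_cons (den : Int) (s : String) (rest : List String) (i : Int)
    (concat : String) (perm : List String) :
    pvGroupLoop den (s :: rest) i concat perm =
      if PySem.Int.mod i den ≠ 0 then pvGroupLoop den rest (i + 1) (concat ++ s) perm
      else pvGroupLoop den rest (i + 1) "" (perm ++ [concat ++ s]) := rfl

theorem pvGroup_inner (k : Nat) (hk : 0 < k) :
    ∀ (ps : List String), ps ≠ [] → ∀ (j m : Nat), j + ps.length = k →
    ∀ (rest : List String) (concat : String) (acc : List String),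
    pvGroupLoop (k : Int) (ps ++ rest) ((m * k + j + 1 : Nat) : Int) concat acc
      = pvGroupLoop (k : Int) rest (((m + 1) * k + 1 : Nat) : Int) "" (acc ++ [ps.foldl (· ++ ·) concat]) := by
  intro ps
  induction ps with
  | nil => intro h; exact absurd rfl h
  | cons s t ih =>
    intro _ j m hj rest concat acc
    cases t with
    | nil =>
      have hj' : j + 1 = k := by simpa using hj
      have hi : m * k + j + 1 = (m + 1) * k := by rw [← hj']; ring
      rw [List.cons_append, List.nil_append, pvGroupLoop_cons, hi]
      have hmod : PySem.Int.mod (((m + 1) * k : Nat) : Int) ((k : Nat) : Int) = 0 := by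
        rw [PySem.Int.mod_natCast, Nat.mul_mod_left]
        simp
      rw [if_neg (by simpa using hmod)]
      have : (((m + 1) * k : Nat) : Int) + 1 = (((m + 1) * k + 1 : Nat) : Int) := by push_cast; ring
      rw [this]
      rfl
    | cons s' t' =>
      have hlt : j + 1 < k := by simp at hj; omega
      have hmod : PySem.Int.mod ((m * k + j + 1 : Nat) : Int) ((k : Nat) : Int) = ((j + 1 : Nat) : Int) := by
        rw [PySem.Int.mod_natCast]
        congr 1
        have h2 : m * k + j + 1 = (j + 1) + m * k := by ring
        rw [h2, Nat.add_mul_mod_self_right, Nat.mod_eq_of_lt hlt]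
      rw [List.cons_append, pvGroupLoop_cons]
      rw [if_pos (by rw [hmod]; exact_mod_cast Nat.succ_ne_zero j)]
      have hstep : ((m * k + j + 1 : Nat) : Int) + 1 = ((m * k + (j + 1) + 1 : Nat) : Int) := by
        push_cast; ring
      rw [hstep, ih (List.cons_ne_nil s' t') (j + 1) m (by simp at hj ⊢; omega) rest (concat ++ s) acc]
      rfl

theorem pvGroup_main (k : Nat) (hk : 0 < k) :
    ∀ (pss : List (List String)), (∀ ps ∈ pss, ps.length = k) →
    ∀ (m : Nat) (acc : List String),
    pvGroupLoop (k : Int) pss.flatten ((m * k + 1 : Nat) : Int) "" acc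
      = acc ++ pss.map (fun ps => ps.foldl (· ++ ·) "") := by
  intro pss
  induction pss with
  | nil => intro _ m acc; simp [pvGroupLoop]
  | cons ps pss ih =>
    intro h m acc
    have hlen : ps.length = k := h ps (List.mem_cons_self ..)
    have hne : ps ≠ [] := by
      intro he; rw [he] at hlen; simp at hlen; omega
    have h0 : m * k + 1 = m * k + 0 + 1 := by ring
    rw [List.flatten_cons, h0, pvGroup_inner k hk ps hne 0 m (by omega) pss.flatten "" acc,
      ih (fun q hq => h q (List.mem_cons_of_mem _ hq)) (m + 1) (acc ++ [ps.foldl (· ++ ·) ""])]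
    simp

-- A's permutation block computes the values B computes
theorem pvPermInts_eq (lst : List Int) (hne : lst ≠ []) :
    pvPermInts lst = (PySem.List.permutations lst lst.length).map pvNumB := by
  have hk : 0 < lst.length := List.length_pos_of_ne_nil hne
  have hlen : ∀ p ∈ (PySem.List.permutations lst lst.length).map (List.map PySem.Int.toStr),
      p.length = lst.length := by
    intro p hp
    rcases List.mem_map.mp hp with ⟨q, hq, rfl⟩
    simpa using (PySem.List.perm_of_mem_permutations hq).length_eq
  have h2 : (((PySem.List.permutations lst lst.length).map (fun i => i)).flatMap (fun i => i)).map PySem.Int.toStr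
      = ((PySem.List.permutations lst lst.length).map (List.map PySem.Int.toStr)).flatten := by
    simp [List.flatMap_def]
  show (pvConcatLoop ((((PySem.List.permutations lst lst.length).map (fun i => i)).flatMap
      (fun i => i)).map PySem.Int.toStr) ((lst.length : Nat) : Int) 1 "" []).map
      (fun s => (PySem.Int.ofStr? s).getD 0)
    = (PySem.List.permutations lst lst.length).map pvNumB
  rw [h2]
  rw [pvConcat_eq_group _ _ 1 le_rfl]
  have h3 : ((1 : Int) - 1).toNat = 0 := rfl
  rw [h3, List.drop_zero]
  have h4 : (1 : Int) = ((0 * lst.length + 1 : Nat) : Int) := by push_cast; ring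
  have h5 : (lst.length : Int) = ((lst.length : Nat) : Int) := rfl
  rw [h4, pvGroup_main lst.length hk _ hlen 0 []]
  rw [List.nil_append, List.map_map, List.map_map]
  apply List.map_congr_left
  intro p _
  simp only [Function.comp]
  rw [pvNumB, pvJoinEq]

-- digitsLoop is nonempty on positive input
theorem pvDigitsLoop_ne_nil {t : Int} (h : t > 0) : pvDigitsLoop t [] ≠ [] := by
  rw [pvDigitsLoop, dif_pos h]
  have hacc := pvDigitsLoop_acc (PySem.Int.floordiv t 10) [PySem.Int.mod t 10] []
  simp only [List.append_nil, List.nil_append] at hacc ⊢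
  rw [hacc]
  simp

-- cross-product scan = divisibility test + membership in the value set
theorem pvCore (P1 P2 : List (List Int)) (n : Int) (hn : 0 < n) :
    ((P1.map pvNumB).flatMap (fun i => (P2.map pvNumB).map (fun j => i * j))).any (fun i => i == n)
    = P1.any (fun p => PySem.Int.mod n (pvNumB p) == 0 &&
        (PySem.Set.ofList (P2.map pvNumB)).contains (PySem.Int.floordiv n (pvNumB p))) := by
  have hmem : ∀ a : Int, (PySem.Set.ofList (P2.map pvNumB)).contains a = true ↔ ∃ q ∈ P2, pvNumB q = a := by
    intro a; simp [PySem.Set.mem_ofList]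
  rw [Bool.eq_iff_iff]
  simp only [List.any_eq_true, List.mem_flatMap, List.mem_map, Bool.and_eq_true, beq_iff_eq, hmem]
  constructor
  · rintro ⟨x, ⟨v, ⟨p, hp, rfl⟩, w, ⟨q, hq, rfl⟩, rfl⟩, heqn⟩
    have hv0 : pvNumB p ≠ 0 := by
      rintro h0; rw [h0, zero_mul] at heqn; omega
    have hmod0 : PySem.Int.mod n (pvNumB p) = 0 :=
      (PySem.Int.mod_eq_zero_iff_dvd n (pvNumB p)).mpr ⟨pvNumB q, heqn.symm⟩
    refine ⟨p, hp, hmod0, q, hq, ?_⟩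
    have hid := PySem.Int.floordiv_mul_add_mod n (pvNumB p)
    rw [hmod0, add_zero] at hid
    have h2 : pvNumB q * pvNumB p = PySem.Int.floordiv n (pvNumB p) * pvNumB p := by
      rw [hid, mul_comm]; exact heqn
    exact mul_right_cancel₀ hv0 h2
  · rintro ⟨p, hp, hmod0, q, hq, hq'⟩
    have hv0 : pvNumB p ≠ 0 := by
      rintro h0
      rw [h0, PySem.Int.mod_eq_zero_iff_dvd] at hmod0
      have := Int.zero_dvd.mp hmod0
      omega
    have hid := PySem.Int.floordiv_mul_add_mod n (pvNumB p)
    rw [hmod0, add_zero] at hid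
    exact ⟨pvNumB p * pvNumB q, ⟨pvNumB p, ⟨p, hp, rfl⟩, pvNumB q, ⟨q, hq, rfl⟩, rfl⟩,
      by rw [hq', mul_comm]; exact hid⟩

-- the per-number bodies agree
theorem pvVampire_eq (n : Int) : pvVampireA n = pvVampireB n := by
  by_cases hn : n > 0
  · -- positive n
    have hds : ∀ d ∈ (pvDigitsLoop n []).reverse, 0 ≤ d ∧ d < 10 := by
      intro d hd
      exact pvDigitsLoop_digits (by simp) d (List.mem_reverse.mp hd)
    have hne : (pvDigitsLoop n []).reverse ≠ [] := by
      simp [pvDigitsLoop_ne_nil hn]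
    simp only [pvVampireA, pvVampireB]
    set ds := (pvDigitsLoop n []).reverse with hdsdef
    set L := ds.length with hL
    have hcount : pvCountLoop n 0 = ((L : Nat) : Int) := by
      rw [pvCountLoop_eq]
      simp [hL, hdsdef]
    rw [hcount]
    by_cases hpar : L % 2 = 0
    · -- even digit count
      have hL2 : 2 ≤ L := by
        have : 0 < L := List.length_pos_of_ne_nil hne
        omega
      set k := L / 2 with hk
      have hkk : k + k = L := by omega
      have hk1 : 1 ≤ k := by omega
      have htake : (ds.take k).length = k := by simp [hL]; omega
      have hdrop : (ds.drop k).length = k := by simp [← hL]; omega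
      have htakeE : ds.take k ≠ [] := by
        intro h; rw [h] at htake; simp at htake; omega
      have hdropE : ds.drop k ≠ [] := by
        intro h; rw [h] at hdrop; simp at hdrop; omega
      have hmid : PySem.Int.floordiv ((L : Nat) : Int) 2 = ((k : Nat) : Int) := by
        rw [show ((2:Int) = ((2:Nat):Int)) from rfl, PySem.Int.floordiv_natCast]
      have hlst1 : (PySem.List.pyRange 0 (PySem.Int.floordiv ((L : Nat) : Int) 2) 1).foldl
          (fun acc i => acc ++ [PySem.Int.toStr (PySem.List.pyGetD ds i 0)]) []
          = (ds.take k).map PySem.Int.toStr := by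
        rw [hmid, pvFoldlAppend, List.nil_append,
          show (fun (i : Int) => PySem.Int.toStr (PySem.List.pyGetD ds i 0))
            = PySem.Int.toStr ∘ (fun (i : Int) => PySem.List.pyGetD ds i 0) from rfl,
          ← List.map_map, pvRangeTake ds 0 k (by omega)]
      have hlst2 : (PySem.List.pyRange (PySem.Int.floordiv ((L : Nat) : Int) 2) ((L : Nat) : Int) 1).foldl
          (fun acc i => acc ++ [PySem.Int.toStr (PySem.List.pyGetD ds i 0)]) []
          = (ds.drop k).map PySem.Int.toStr := by
        rw [hmid, pvFoldlAppend, List.nil_append,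
          show (fun (i : Int) => PySem.Int.toStr (PySem.List.pyGetD ds i 0))
            = PySem.Int.toStr ∘ (fun (i : Int) => PySem.List.pyGetD ds i 0) from rfl,
          ← List.map_map, show ((L : Nat) : Int) = PySem.List.len ds from by simp [PySem.List.len_eq, hL],
          PySem.List.map_pyGetD_pyRange ds 0 (by positivity),
          show (((k : Nat) : Int)).toNat = k from by omega]
      have hround : ∀ (xs : List Int), (∀ d ∈ xs, 0 ≤ d ∧ d < 10) →
          (xs.map PySem.Int.toStr).map (fun s => (PySem.Int.ofStr? s).getD 0) = xs := by
        intro xs hxs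
        rw [List.map_map]
        have : ∀ x ∈ xs, ((fun s => (PySem.Int.ofStr? s).getD 0) ∘ PySem.Int.toStr) x = id x := by
          intro x hx
          simpa using pvRoundTrip (hxs x hx).1 (hxs x hx).2
        rw [List.map_congr_left this, List.map_id]
      have hround1 := hround (ds.take k) (fun d hd => hds d (List.take_subset _ _ hd))
      have hround2 := hround (ds.drop k) (fun d hd => hds d (List.drop_subset _ _ hd))
      rw [if_pos (by
        rw [show ((2:Int) = ((2:Nat):Int)) from rfl, PySem.Int.mod_natCast, hpar]
        simp)]
      rw [if_pos (by simp [hne, ← hL, hpar])]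
      rw [hlst1, hlst2, hround1, hround2,
        pvPermInts_eq _ htakeE, pvPermInts_eq _ hdropE]
      exact pvCore _ _ n (by omega)
    · -- odd digit count: both sides are false
      rw [if_neg (by
        rw [show ((2:Int) = ((2:Nat):Int)) from rfl, PySem.Int.mod_natCast]
        simp [hpar]
        omega), if_neg (by simp [← hL, hpar])]
  · -- nonpositive n: A's even branch finds nothing, B's guard fails
    have hd : pvDigitsLoop n [] = [] := pvDigitsLoop_nonpos hn []
    simp only [pvVampireA, pvVampireB]
    rw [show pvCountLoop n 0 = 0 from by rw [pvCountLoop_eq, hd]; simp]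
    rw [hd]
    simp [pvPermInts, pvConcatLoop, PySem.List.pyRange_one_eq_nil, PySem.Int.mod]

-- outer loops agree
theorem pvLoop_eq (minx maxx : Int) (acc : List Int) :
    pvLoopA minx maxx acc =
      (PySem.List.pyRange minx (maxx + 1) 1).foldl
        (fun acc n => if pvVampireB n then acc ++ [n] else acc) acc := by
  by_cases h : minx ≤ maxx
  · rw [pvLoopA, if_pos h, PySem.List.pyRange_one_cons (by omega : minx < maxx + 1),
      List.foldl_cons, pvLoop_eq (minx + 1) maxx]
    congr 1
    rw [pvVampire_eq]
    split_ifs <;> simp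
  · rw [pvLoopA, if_neg h, PySem.List.pyRange_one_eq_nil (by omega : maxx + 1 ≤ minx)]
    rfl
termination_by (maxx + 1 - minx).toNat
decreasing_by omega

-- ===== VERDICT (by name: the statement is the Claim_ definition above) =====
theorem check_vampire_spec : Claim_equal_check_vampire := by
  intro minx maxx _
  unfold Spec_check_vampire check_vampire check_vampire_alt
  exact pvLoop_eq minx maxx []
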